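-- pv_equiv track=rewrite | github.com/manarone/AgenticAI | src/services/coordinator/main.py | _strip_search_intent_prefix
-- ===== SOURCE A (Python) =====
-- SEARCH_INTENT_PHRASES = (
--     'search and find me',
--     'search for',
--     'search',
--     'find me',
--     'find',
--     'look up',
--     'lookup',
--     'get me',
--     'show me',
--     'tell me',
-- )
--
-- def _strip_search_intent_prefix(query: str) -> str:
--     stripped = query.strip()
--     lowered = stripped.lower()
--     for phrase in SEARCH_INTENT_PHRASES:
--         if lowered == phrase:
--             return ''
--         if lowered.startswith(f'{phrase} '):
--             return stripped[len(phrase) :].strip(" \t:-,")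
--     return stripped
-- ===== SOURCE B (Python) =====
-- SEARCH_INTENT_PHRASES = (
--     'search and find me',
--     'search for',
--     'search',
--     'find me',
--     'find',
--     'look up',
--     'lookup',
--     'get me',
--     'show me',
--     'tell me',
-- )
--
-- _PHRASE_SET = frozenset(SEARCH_INTENT_PHRASES)
-- _CUT_LENGTHS = sorted({len(p) for p in SEARCH_INTENT_PHRASES}, reverse=True)
--
--
-- def _strip_search_intent_prefix(query: str) -> str:
--     # Longest-boundary-first: try each candidate cut length (descending) and
--     # test the prefix of that length against a set of phrases.  Equivalent to
--     # the ordered per-phrase scan because whenever two phrases both match,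
--     # the original tuple lists the longer one first.
--     stripped = query.strip()
--     lowered = stripped.lower()
--     n = len(lowered)
--     for i in _CUT_LENGTHS:
--         if (n == i or (n > i and lowered[i] == ' ')) and lowered[:i] in _PHRASE_SET:
--             return stripped[i:].strip(" \t:-,")
--     return stripped
-- ===== Notes on version B (the rewrite author's own statement) =====
-- stated objective: alternative
-- what changed: Replaces the ordered per-phrase scan (equality + startswith per phrase) with a longest-boundary-first match: for each candidate cut length in descending order, one word-boundary test plus one set-membership test of the lowered prefix.
import Mathlib
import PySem

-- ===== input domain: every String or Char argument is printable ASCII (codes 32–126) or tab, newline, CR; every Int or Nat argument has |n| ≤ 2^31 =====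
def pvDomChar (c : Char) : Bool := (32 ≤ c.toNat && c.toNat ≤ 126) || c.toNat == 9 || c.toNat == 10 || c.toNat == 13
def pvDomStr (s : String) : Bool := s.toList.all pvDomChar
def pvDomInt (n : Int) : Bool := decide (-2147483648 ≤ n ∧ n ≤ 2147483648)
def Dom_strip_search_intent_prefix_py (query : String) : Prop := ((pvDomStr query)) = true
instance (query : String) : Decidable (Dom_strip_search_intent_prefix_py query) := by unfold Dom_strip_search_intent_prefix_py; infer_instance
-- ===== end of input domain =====

-- B replaces A's ordered per-phrase scan by a longest-boundary-first match over the
-- distinct phrase lengths with a set-membership test of the lowered prefix (alternative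
-- decomposition, same cost).

-- ===== PORT A =====
def pvSearchIntentPhrasesA : List String :=
  ["search and find me", "search for", "search", "find me", "find",
   "look up", "lookup", "get me", "show me", "tell me"]

def pvGoA (s l : String) : List String → String
  | [] => s
  | p :: rest =>
    if l = p then ""
    else if PySem.Str.startswith l (p ++ " ") then
      PySem.Str.stripChars (PySem.Str.slice s (some (PySem.Str.len p)) none) " \t:-,"
    else pvGoA s l rest

def strip_search_intent_prefix_py (query : String) : String :=
  let stripped := PySem.Str.strip query
  let lowered := PySem.Str.lower stripped
  pvGoA stripped lowered pvSearchIntentPhrasesA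

-- ===== PORT B =====
def pvSearchIntentPhrasesB : List String :=
  ["search and find me", "search for", "search", "find me", "find",
   "look up", "lookup", "get me", "show me", "tell me"]

def pvPhraseSetB : PySem.Set String := PySem.Set.ofList pvSearchIntentPhrasesB

def pvCutLengths : List Int :=
  PySem.List.sorted (PySem.Set.ofList (pvSearchIntentPhrasesB.map PySem.Str.len)) (fun x => x) true

def pvGoB (s l : String) (n : Int) : List Int → String
  | [] => s
  | i :: rest =>
    if (n = i ∨ (i < n ∧ PySem.Str.pyGet? l i = some ' ')) ∧
        PySem.Str.slice l none (some i) ∈ pvPhraseSetB then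
      PySem.Str.stripChars (PySem.Str.slice s (some i) none) " \t:-,"
    else pvGoB s l n rest

def strip_search_intent_prefix_py_alt (query : String) : String :=
  let stripped := PySem.Str.strip query
  let lowered := PySem.Str.lower stripped
  let n := PySem.Str.len lowered
  pvGoB stripped lowered n pvCutLengths

-- ===== PRECONDITION & SPEC =====
def Spec_strip_search_intent_prefix_py (query : String) (out : String) : Prop := out = strip_search_intent_prefix_py_alt query
instance (query : String) (out : String) : Decidable (Spec_strip_search_intent_prefix_py query out) := by unfold Spec_strip_search_intent_prefix_py; infer_instance

-- ===== CLAIM (what is proved, stated in full; the proofs are below) =====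
def Claim_equal_strip_search_intent_prefix_py : Prop := ∀ (query : String), Dom_strip_search_intent_prefix_py query → Spec_strip_search_intent_prefix_py query (strip_search_intent_prefix_py query)

-- ===== LEMMAS AND PROOFS =====

-- A phrase p matches the lowered text L when L is exactly p or starts with p followed by a space.
def pvM (L p : List Char) : Prop := L = p ∨ (p ++ [' ']) <+: L

def pvOut (s : String) (i : Int) : String :=
  PySem.Str.stripChars (PySem.Str.slice s (some i) none) " \t:-,"

def pvCondB (l : String) (n i : Int) : Prop :=
  (n = i ∨ (i < n ∧ PySem.Str.pyGet? l i = some ' ')) ∧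
    PySem.Str.slice l none (some i) ∈ pvPhraseSetB

lemma pvM_take {L p : List Char} (h : pvM L p) : L.take p.length = p := by
  cases h with
  | inl h => rw [h, List.take_length]
  | inr h =>
    have hp : p <+: L := (List.prefix_append p [' ']).trans h
    exact (List.prefix_iff_eq_take.mp hp).symm

lemma pvM_iff {L : List Char} (p : List Char) :
    pvM L p ↔ ((L.length = p.length ∨ (p.length < L.length ∧ L[p.length]? = some ' ')) ∧
      L.take p.length = p) := by
  constructor
  · intro h
    refine ⟨?_, pvM_take h⟩
    cases h with
    | inl h => exact Or.inl (by rw [h])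
    | inr h =>
      obtain ⟨t, ht⟩ := h
      have hL : L.length = p.length + 1 + t.length := by rw [← ht]; simp; omega
      right
      constructor
      · omega
      · rw [← ht, List.append_assoc, List.getElem?_append_right (le_refl _)]
        simp
  · rintro ⟨hb, ht⟩
    cases hb with
    | inl hb => exact Or.inl (by rw [← ht, List.take_of_length_le (by omega)])
    | inr hb =>
      right
      rw [List.prefix_iff_eq_take]
      have hlen1 : (p ++ [' ']).length = p.length + 1 := by simp
      have htake : L.take (p.length + 1) = L.take p.length ++ L[p.length]?.toList := List.take_add_one
      rw [hlen1, htake, ht, hb.2]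
      rfl

lemma pvM_excl {L p q : List Char} (hle : p.length ≤ q.length) (hne : q.take p.length ≠ p)
    (hp : pvM L p) (hq : pvM L q) : False := by
  apply hne
  calc q.take p.length = (L.take q.length).take p.length := by rw [pvM_take hq]
    _ = L.take p.length := by rw [List.take_take, Nat.min_eq_left hle]
    _ = p := pvM_take hp

lemma pvOut_empty (s : String) (i : Int) (h0 : 0 ≤ i) (h : s.toList.length ≤ i.toNat) :
    pvOut s i = "" := by
  have h1 : (PySem.Str.slice s (some i) none).toList = [] := by
    rw [PySem.Str.toList_slice, PySem.Chars.slice_eq_listSlice, PySem.List.slice_from s.toList h0,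
      List.drop_eq_nil_iff]
    exact h
  have h2 : PySem.Str.slice s (some i) none = "" := String.toList_inj.mp (by rw [h1]; rfl)
  rw [pvOut, h2]
  decide

lemma pvStartswith_iff (l p : String) :
    PySem.Str.startswith l (p ++ " ") = true ↔ (p.toList ++ [' ']) <+: l.toList := by
  rw [PySem.Str.startswith_eq, PySem.Chars.startswith_iff, String.toList_append]
  rfl

lemma pvGoA_cons_pos (s l p : String) (rest : List String)
    (hlen : s.toList.length = l.toList.length) (h : pvM l.toList p.toList) :
    pvGoA s l (p :: rest) = pvOut s (PySem.Str.len p) := by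
  by_cases he : l = p
  · have hout : pvOut s (PySem.Str.len p) = "" := by
      apply pvOut_empty
      · rw [PySem.Str.len_eq]; exact Int.natCast_nonneg _
      · rw [PySem.Str.len_eq, Int.toNat_natCast]
        exact le_of_eq (by rw [hlen, he])
    simp only [pvGoA]
    rw [if_pos he, hout]
  · have hsw : PySem.Str.startswith l (p ++ " ") = true := by
      rw [pvStartswith_iff]
      cases h with
      | inl h => exact absurd (String.toList_inj.mp h) he
      | inr h => exact h
    simp only [pvGoA]
    rw [if_neg he, if_pos hsw]
    rfl
lemma pvGoA_cons_neg (s l p : String) (rest : List String) (h : ¬ pvM l.toList p.toList) :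
    pvGoA s l (p :: rest) = pvGoA s l rest := by
  have h1 : ¬ (l = p) := fun e => h (Or.inl (by rw [e]))
  have h2 : ¬ (PySem.Str.startswith l (p ++ " ") = true) := fun hs => h (Or.inr ((pvStartswith_iff l p).mp hs))
  simp only [pvGoA]
  rw [if_neg h1, if_neg h2]

lemma pvGoB_cons_pos (s l : String) (n i : Int) (rest : List Int) (h : pvCondB l n i) :
    pvGoB s l n (i :: rest) = pvOut s i := by
  unfold pvCondB at h
  simp only [pvGoB]
  rw [if_pos h]
  rfl

lemma pvGoB_cons_neg (s l : String) (n i : Int) (rest : List Int) (h : ¬ pvCondB l n i) :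
    pvGoB s l n (i :: rest) = pvGoB s l n rest := by
  unfold pvCondB at h
  simp only [pvGoB, if_neg h]

lemma pvCondB_iff (l : String) (i : Nat) (j : Int) (hj : j = (i : Int)) :
    pvCondB l (PySem.Str.len l) j ↔
      ∃ p ∈ pvSearchIntentPhrasesB, p.toList.length = i ∧ pvM l.toList p.toList := by
  subst hj
  unfold pvCondB
  have hq : (PySem.Str.slice l none (some ((i : Nat) : Int))).toList = l.toList.take i := by
    rw [PySem.Str.toList_slice, PySem.Chars.slice_eq_listSlice,
      PySem.List.slice_to l.toList (Int.natCast_nonneg i), Int.toNat_natCast]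
  rw [PySem.Str.len_eq, PySem.Str.pyGet?_natCast]
  constructor
  · rintro ⟨hb, hm⟩
    have hile : i ≤ l.toList.length := by
      rcases hb with hb | hb
      · omega
      · have := hb.1; omega
    rw [pvPhraseSetB, PySem.Set.mem_ofList] at hm
    refine ⟨PySem.Str.slice l none (some ((i : Nat) : Int)), hm, ?_, ?_⟩
    · rw [hq, List.length_take]; omega
    · rw [pvM_iff, hq, List.length_take, Nat.min_eq_left hile]
      refine ⟨?_, rfl⟩
      rcases hb with hb | hb
      · exact Or.inl (by omega)
      · exact Or.inr ⟨by omega, hb.2⟩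
  · rintro ⟨p, hp, hplen, hM⟩
    rw [pvM_iff] at hM
    obtain ⟨hb, ht⟩ := hM
    constructor
    · rcases hb with hb | hb
      · exact Or.inl (by omega)
      · exact Or.inr ⟨by omega, by rw [← hplen]; exact hb.2⟩
    · rw [pvPhraseSetB, PySem.Set.mem_ofList]
      have : PySem.Str.slice l none (some ((i : Nat) : Int)) = p := by
        rw [← String.toList_inj, hq, ← hplen, ht]
      rw [this]
      exact hp

set_option maxHeartbeats 2000000 in
lemma pvMain (s l : String) (hlen : s.toList.length = l.toList.length) :
    pvGoA s l pvSearchIntentPhrasesA = pvGoB s l (PySem.Str.len l) pvCutLengths := by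
  have hcut : pvCutLengths = [18, 10, 7, 6, 4] := by decide
  rw [hcut]
  simp only [pvSearchIntentPhrasesA]
  by_cases h1 : pvM l.toList "search and find me".toList
  · rw [pvGoA_cons_pos s l _ _ hlen h1,
      pvGoB_cons_pos s l _ _ _ ((pvCondB_iff l 18 18 (by norm_num)).mpr ⟨"search and find me", by simp [pvSearchIntentPhrasesB], by decide, h1⟩)]
    have : PySem.Str.len "search and find me" = (18 : Int) := by decide
    rw [this]
  · rw [pvGoA_cons_neg s l _ _ h1,
      pvGoB_cons_neg s l _ _ _ (fun hc => by
        obtain ⟨p, hp, hplen, hM⟩ := (pvCondB_iff l 18 18 (by norm_num)).mp hc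
        simp only [pvSearchIntentPhrasesB, List.mem_cons, List.not_mem_nil, or_false] at hp
        rcases hp with rfl | rfl | rfl | rfl | rfl | rfl | rfl | rfl | rfl | rfl
        all_goals first
          | exact absurd hplen (by decide)
          | exact h1 hM)]
    by_cases h2 : pvM l.toList "search for".toList
    · rw [pvGoA_cons_pos s l _ _ hlen h2,
        pvGoB_cons_pos s l _ _ _ ((pvCondB_iff l 10 10 (by norm_num)).mpr ⟨"search for", by simp [pvSearchIntentPhrasesB], by decide, h2⟩)]
      have : PySem.Str.len "search for" = (10 : Int) := by decide
      rw [this]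
    · rw [pvGoA_cons_neg s l _ _ h2,
        pvGoB_cons_neg s l _ _ _ (fun hc => by
          obtain ⟨p, hp, hplen, hM⟩ := (pvCondB_iff l 10 10 (by norm_num)).mp hc
          simp only [pvSearchIntentPhrasesB, List.mem_cons, List.not_mem_nil, or_false] at hp
          rcases hp with rfl | rfl | rfl | rfl | rfl | rfl | rfl | rfl | rfl | rfl
          all_goals first
            | exact absurd hplen (by decide)
            | exact h2 hM)]
      by_cases h3 : pvM l.toList "search".toList
      · -- "search" matches: no length-7 phrase can match, B fires at length 6
        rw [pvGoA_cons_pos s l _ _ hlen h3,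
          pvGoB_cons_neg s l _ _ _ (fun hc => by
            obtain ⟨p, hp, hplen, hM⟩ := (pvCondB_iff l 7 7 (by norm_num)).mp hc
            simp only [pvSearchIntentPhrasesB, List.mem_cons, List.not_mem_nil, or_false] at hp
            rcases hp with rfl | rfl | rfl | rfl | rfl | rfl | rfl | rfl | rfl | rfl
            all_goals first
              | exact absurd hplen (by decide)
              | exact pvM_excl (by decide) (by decide) h3 hM),
          pvGoB_cons_pos s l _ _ _ ((pvCondB_iff l 6 6 (by norm_num)).mpr ⟨"search", by simp [pvSearchIntentPhrasesB], by decide, h3⟩)]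
        have : PySem.Str.len "search" = (6 : Int) := by decide
        rw [this]
      · rw [pvGoA_cons_neg s l _ _ h3]
        by_cases h4 : pvM l.toList "find me".toList
        · rw [pvGoA_cons_pos s l _ _ hlen h4,
            pvGoB_cons_pos s l _ _ _ ((pvCondB_iff l 7 7 (by norm_num)).mpr ⟨"find me", by simp [pvSearchIntentPhrasesB], by decide, h4⟩)]
          have : PySem.Str.len "find me" = (7 : Int) := by decide
          rw [this]
        · rw [pvGoA_cons_neg s l _ _ h4]
          by_cases h5 : pvM l.toList "find".toList
          · rw [pvGoA_cons_pos s l _ _ hlen h5,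
              pvGoB_cons_neg s l _ _ _ (fun hc => by
                obtain ⟨p, hp, hplen, hM⟩ := (pvCondB_iff l 7 7 (by norm_num)).mp hc
                simp only [pvSearchIntentPhrasesB, List.mem_cons, List.not_mem_nil, or_false] at hp
                rcases hp with rfl | rfl | rfl | rfl | rfl | rfl | rfl | rfl | rfl | rfl
                all_goals first
                  | exact absurd hplen (by decide)
                  | exact h4 hM
                  | exact pvM_excl (by decide) (by decide) h5 hM),
              pvGoB_cons_neg s l _ _ _ (fun hc => by
                obtain ⟨p, hp, hplen, hM⟩ := (pvCondB_iff l 6 6 (by norm_num)).mp hc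
                simp only [pvSearchIntentPhrasesB, List.mem_cons, List.not_mem_nil, or_false] at hp
                rcases hp with rfl | rfl | rfl | rfl | rfl | rfl | rfl | rfl | rfl | rfl
                all_goals first
                  | exact absurd hplen (by decide)
                  | exact h3 hM
                  | exact pvM_excl (by decide) (by decide) h5 hM),
              pvGoB_cons_pos s l _ _ _ ((pvCondB_iff l 4 4 (by norm_num)).mpr ⟨"find", by simp [pvSearchIntentPhrasesB], by decide, h5⟩)]
            have : PySem.Str.len "find" = (4 : Int) := by decide
            rw [this]
          · rw [pvGoA_cons_neg s l _ _ h5]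
            by_cases h6 : pvM l.toList "look up".toList
            · rw [pvGoA_cons_pos s l _ _ hlen h6,
                pvGoB_cons_pos s l _ _ _ ((pvCondB_iff l 7 7 (by norm_num)).mpr ⟨"look up", by simp [pvSearchIntentPhrasesB], by decide, h6⟩)]
              have : PySem.Str.len "look up" = (7 : Int) := by decide
              rw [this]
            · rw [pvGoA_cons_neg s l _ _ h6]
              by_cases h7 : pvM l.toList "lookup".toList
              · rw [pvGoA_cons_pos s l _ _ hlen h7,
                  pvGoB_cons_neg s l _ _ _ (fun hc => by
                    obtain ⟨p, hp, hplen, hM⟩ := (pvCondB_iff l 7 7 (by norm_num)).mp hc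
                    simp only [pvSearchIntentPhrasesB, List.mem_cons, List.not_mem_nil, or_false] at hp
                    rcases hp with rfl | rfl | rfl | rfl | rfl | rfl | rfl | rfl | rfl | rfl
                    all_goals first
                      | exact absurd hplen (by decide)
                      | exact h4 hM
                      | exact h6 hM
                      | exact pvM_excl (by decide) (by decide) h7 hM),
                  pvGoB_cons_pos s l _ _ _ ((pvCondB_iff l 6 6 (by norm_num)).mpr ⟨"lookup", by simp [pvSearchIntentPhrasesB], by decide, h7⟩)]
                have : PySem.Str.len "lookup" = (6 : Int) := by decide
                rw [this]
              · rw [pvGoA_cons_neg s l _ _ h7]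
                by_cases h8 : pvM l.toList "get me".toList
                · rw [pvGoA_cons_pos s l _ _ hlen h8,
                    pvGoB_cons_neg s l _ _ _ (fun hc => by
                      obtain ⟨p, hp, hplen, hM⟩ := (pvCondB_iff l 7 7 (by norm_num)).mp hc
                      simp only [pvSearchIntentPhrasesB, List.mem_cons, List.not_mem_nil, or_false] at hp
                      rcases hp with rfl | rfl | rfl | rfl | rfl | rfl | rfl | rfl | rfl | rfl
                      all_goals first
                        | exact absurd hplen (by decide)
                        | exact h4 hM
                        | exact h6 hM
                        | exact pvM_excl (by decide) (by decide) h8 hM),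
                    pvGoB_cons_pos s l _ _ _ ((pvCondB_iff l 6 6 (by norm_num)).mpr ⟨"get me", by simp [pvSearchIntentPhrasesB], by decide, h8⟩)]
                  have : PySem.Str.len "get me" = (6 : Int) := by decide
                  rw [this]
                · rw [pvGoA_cons_neg s l _ _ h8]
                  by_cases h9 : pvM l.toList "show me".toList
                  · rw [pvGoA_cons_pos s l _ _ hlen h9,
                      pvGoB_cons_pos s l _ _ _ ((pvCondB_iff l 7 7 (by norm_num)).mpr ⟨"show me", by simp [pvSearchIntentPhrasesB], by decide, h9⟩)]
                    have : PySem.Str.len "show me" = (7 : Int) := by decide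
                    rw [this]
                  · rw [pvGoA_cons_neg s l _ _ h9]
                    by_cases h10 : pvM l.toList "tell me".toList
                    · rw [pvGoA_cons_pos s l _ _ hlen h10,
                        pvGoB_cons_pos s l _ _ _ ((pvCondB_iff l 7 7 (by norm_num)).mpr ⟨"tell me", by simp [pvSearchIntentPhrasesB], by decide, h10⟩)]
                      have : PySem.Str.len "tell me" = (7 : Int) := by decide
                      rw [this]
                    · rw [pvGoA_cons_neg s l _ _ h10]
                      have hnone : ∀ (i : Nat) (j : Int), j = (i : Int) → pvCondB l (PySem.Str.len l) j → False := by
                        intro i j hj hc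
                        obtain ⟨p, hp, hplen, hM⟩ := (pvCondB_iff l i j hj).mp hc
                        simp only [pvSearchIntentPhrasesB, List.mem_cons, List.not_mem_nil, or_false] at hp
                        rcases hp with rfl | rfl | rfl | rfl | rfl | rfl | rfl | rfl | rfl | rfl
                        · exact h1 hM
                        · exact h2 hM
                        · exact h3 hM
                        · exact h4 hM
                        · exact h5 hM
                        · exact h6 hM
                        · exact h7 hM
                        · exact h8 hM
                        · exact h9 hM
                        · exact h10 hM
                      rw [pvGoB_cons_neg s l _ _ _ (fun hc => hnone 7 7 (by norm_num) hc),
                        pvGoB_cons_neg s l _ _ _ (fun hc => hnone 6 6 (by norm_num) hc),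
                        pvGoB_cons_neg s l _ _ _ (fun hc => hnone 4 4 (by norm_num) hc)]
                      rfl

lemma pvLowerLen (s : String) : s.toList.length = (PySem.Str.lower s).toList.length := by
  rw [PySem.Str.toList_lower, PySem.Chars.lower, List.length_map]

-- ===== VERDICT (by name: the statement is the Claim_ definition above) =====
theorem strip_search_intent_prefix_py_spec : Claim_equal_strip_search_intent_prefix_py := by
  unfold Claim_equal_strip_search_intent_prefix_py
  intro query _
  unfold Spec_strip_search_intent_prefix_py
  unfold strip_search_intent_prefix_py strip_search_intent_prefix_py_alt
  exact pvMain _ _ (pvLowerLen _)
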